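-- pv_equiv track=rewrite | github.com/cirosantilli/cirosantilli.github.io | euler/956.py | exponents_for_star
-- ===== SOURCE A (Python) =====
-- from typing import List
--
-- def exponents_for_star(N: int, primes: List[int]) -> List[int]:
--     exps: List[int] = []
--     for p in primes:
--         vp_in_k = [0] * (N + 1)
--         for k in range(1, N + 1):
--             x = k
--             c = 0
--             while x % p == 0:
--                 x //= p
--                 c += 1
--             vp_in_k[k] = c
--         fact_vp = [0] * (N + 1)
--         for k in range(1, N + 1):
--             fact_vp[k] = fact_vp[k - 1] + vp_in_k[k]
--         E = 0
--         for k in range(1, N + 1):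
--             E += (N + 1 - k) * fact_vp[k]
--         exps.append(E)
--     return exps
-- ===== SOURCE B (Python) =====
-- from typing import List
--
-- def exponents_for_star(N: int, primes: List[int]) -> List[int]:
--     # Legendre-style: E = sum over prime powers q of sum_{m=1}^{N//q} T(N+1-m*q),
--     # with T(t)=t*(t+1)/2, evaluated by closed-form power sums; doubled to stay integral.
--     out: List[int] = []
--     for p in primes:
--         a = abs(p)  # repeated floor-division by p strips a factor |p| each step
--         e2 = 0  # twice the exponent
--         if a >= 2:
--             q = a
--             while q <= N:
--                 M = N // q
--                 s1 = M * (M + 1) // 2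
--                 s2 = M * (M + 1) * (2 * M + 1) // 6
--                 e2 += (N + 1) * (N + 2) * M - (2 * N + 3) * q * s1 + q * q * s2
--                 q *= a
--         out.append(e2 // 2)
--     return out
-- ===== Notes on version B (the rewrite author's own statement) =====
-- stated objective: faster
-- what changed: Replaces the per-k while-loop valuations, prefix-sum array and weighted scan (O(N log N) per prime) by swapping the summation order to Legendre form over prime powers q=|p|^i and evaluating each inner sum with closed-form linear/quadratic power-sum formulas, O(log N) per prime.
import Mathlib
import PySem

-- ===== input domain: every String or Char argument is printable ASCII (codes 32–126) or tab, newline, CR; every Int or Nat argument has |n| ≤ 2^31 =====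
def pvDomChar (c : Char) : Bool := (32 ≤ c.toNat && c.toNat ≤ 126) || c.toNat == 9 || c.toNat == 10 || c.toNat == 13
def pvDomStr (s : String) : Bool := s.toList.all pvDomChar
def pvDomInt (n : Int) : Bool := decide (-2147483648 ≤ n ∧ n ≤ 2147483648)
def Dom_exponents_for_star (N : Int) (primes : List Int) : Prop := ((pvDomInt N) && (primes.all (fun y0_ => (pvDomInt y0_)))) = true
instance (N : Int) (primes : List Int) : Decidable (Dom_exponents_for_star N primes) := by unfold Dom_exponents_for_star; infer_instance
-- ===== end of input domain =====

-- B replaces A's per-k trial-division valuations, prefix-sum array and weighted scan by a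
-- Legendre-style sum over prime powers with closed-form power sums (objective: faster).

-- ===== PORT A =====
-- the while loop 'while x % p == 0: x //= p; c += 1' with state (x, c); fuel x.natAbs is
-- enough iterations whenever 2 ≤ |p| (each pass divides |x| by at least 2)
def vloopA (p : Int) : Nat → Int → Int → Int × Int
  | 0, x, c => (x, c)
  | f+1, x, c =>
    if PySem.Int.mod x p = 0 then vloopA p f (PySem.Int.floordiv x p) (c + 1) else (x, c)

def exponents_for_star (N : Int) (primes : List Int) : List Int :=
  primes.foldl (fun exps p =>
    -- vp_in_k = [0] * (N + 1); vp_in_k[k] = c for k in range(1, N+1)  (k ≥ 1: index in range)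
    let vp0 := PySem.List.pyRepeat [(0 : Int)] (N + 1)
    let vp_in_k := (PySem.List.pyRange 1 (N + 1) 1).foldl (fun l k =>
        PySem.List.pySetD l k (vloopA p k.natAbs k 0).2) vp0
    -- fact_vp = [0] * (N + 1); fact_vp[k] = fact_vp[k-1] + vp_in_k[k]
    let f0 := PySem.List.pyRepeat [(0 : Int)] (N + 1)
    let fact_vp := (PySem.List.pyRange 1 (N + 1) 1).foldl (fun l k =>
        PySem.List.pySetD l k (PySem.List.pyGetD l (k - 1) 0 + PySem.List.pyGetD vp_in_k k 0)) f0
    -- E = sum over k of (N + 1 - k) * fact_vp[k]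
    let E := (PySem.List.pyRange 1 (N + 1) 1).foldl (fun E k =>
        E + (N + 1 - k) * PySem.List.pyGetD fact_vp k 0) 0
    exps ++ [E]) []

-- ===== PORT B =====
-- the while loop 'while q <= N: ... q *= a'; q at least doubles each pass, so fuel N.toNat + 1
-- is enough iterations
def bloopB (N a : Int) : Nat → Int → Int → Int
  | 0, _, e2 => e2
  | f+1, q, e2 =>
    if q ≤ N then
      let M := PySem.Int.floordiv N q
      let s1 := PySem.Int.floordiv (M * (M + 1)) 2
      let s2 := PySem.Int.floordiv (M * (M + 1) * (2 * M + 1)) 6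
      bloopB N a f (q * a) (e2 + ((N + 1) * (N + 2) * M - (2 * N + 3) * q * s1 + q * q * s2))
    else e2

def exponents_for_star_alt (N : Int) (primes : List Int) : List Int :=
  primes.foldl (fun out p =>
    let a := |p|
    let e2 := if 2 ≤ a then bloopB N a (N.toNat + 1) a 0 else 0
    out ++ [PySem.Int.floordiv e2 2]) []

-- ===== PRECONDITION & SPEC =====
-- Pre_ excludes only inputs where A does not return: with N ≥ 1, p = 0 raises
-- ZeroDivisionError and p = ±1 makes the while loop run forever.
def Pre_exponents_for_star (N : Int) (primes : List Int) : Prop :=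
  N ≤ 0 ∨ ∀ p ∈ primes, 2 ≤ |p|
instance (N : Int) (primes : List Int) : Decidable (Pre_exponents_for_star N primes) := by
  unfold Pre_exponents_for_star; infer_instance

def pvWitness_exponents_for_star : Int × List Int := (4, [2, 3])

def Spec_exponents_for_star (N : Int) (primes : List Int) (out : List Int) : Prop := out = exponents_for_star_alt N primes
instance (N : Int) (primes : List Int) (out : List Int) : Decidable (Spec_exponents_for_star N primes out) := by unfold Spec_exponents_for_star; infer_instance

-- ===== CLAIM (what is proved, stated in full; the proofs are below) =====
def Claim_equal_exponents_for_star : Prop := ∀ (N : Int) (primes : List Int), Dom_exponents_for_star N primes → Pre_exponents_for_star N primes → Spec_exponents_for_star N primes (exponents_for_star N primes)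


-- ===== LEMMAS AND PROOFS =====

-- mathematical a-adic valuation of a natural number
def valI (a m : Nat) : Int :=
  if h : 2 ≤ a ∧ a ∣ m ∧ m ≠ 0 then valI a (m / a) + 1 else 0
termination_by m
decreasing_by exact Nat.div_lt_self (Nat.pos_of_ne_zero h.2.2) (by omega)

-- number of i ≥ 0 with q * a^i ∣ j (for j ≥ 1), as an Int
def vvq (a q j : Nat) : Int :=
  if h : 2 ≤ a ∧ 1 ≤ q ∧ q ∣ j ∧ 1 ≤ j then 1 + vvq a (q * a) j else 0
termination_by j + 1 - q
decreasing_by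
  have hqj : q ≤ j := Nat.le_of_dvd h.2.2.2 h.2.2.1
  have h2 : q * 2 ≤ q * a := Nat.mul_le_mul_left q h.1
  omega

-- prefix sums of valuations: Fpre a k = v_a(k!)
def Fpre (a : Nat) : Nat → Int
  | 0 => 0
  | k + 1 => Fpre a k + valI a (k + 1)

-- the doubled triangular weight
def tIw (N : Int) (j : Nat) : Int := (N + 1 - (j : Int)) * (N + 2 - (j : Int))

def Ssum (N : Int) (n a q : Nat) : Int := ∑ i ∈ Finset.range n, tIw N (i + 1) * vvq a q (i + 1)

lemma vloop_snd (p : Int) (ha : 2 ≤ p.natAbs) :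
    ∀ (f : Nat) (x c : Int), x ≠ 0 → x.natAbs ≤ f →
      (vloopA p f x c).2 = c + valI p.natAbs x.natAbs := by
  intro f
  induction f with
  | zero =>
    intro x c hx hf
    exact absurd (Int.natAbs_eq_zero.mp (by omega)) hx
  | succ f ih =>
    intro x c hx hf
    have hp0 : p ≠ 0 := by
      intro h; rw [h] at ha; simp at ha
    by_cases hd : p ∣ x
    · have hm : PySem.Int.mod x p = 0 := (PySem.Int.mod_eq_zero_iff_dvd x p).mpr hd
      simp only [vloopA, if_pos hm]
      set y := PySem.Int.floordiv x p with hydef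
      have hy : y * p = x := by
        simpa [hm] using PySem.Int.floordiv_mul_add_mod x p
      have hyne : y ≠ 0 := by
        intro h; rw [h, zero_mul] at hy; exact hx hy.symm
      have hxy : x.natAbs = y.natAbs * p.natAbs := by rw [← hy, Int.natAbs_mul]
      have hy1 : 1 ≤ y.natAbs := by
        have := Int.natAbs_eq_zero.not.mpr hyne; omega
      have h2 : y.natAbs * 2 ≤ y.natAbs * p.natAbs := Nat.mul_le_mul_left _ ha
      have hlt : y.natAbs < x.natAbs := by omega
      rw [ih y (c + 1) hyne (by omega)]
      have hdiv : x.natAbs / p.natAbs = y.natAbs := by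
        rw [hxy, Nat.mul_div_cancel _ (by omega)]
      conv_rhs => rw [valI, dif_pos (show 2 ≤ p.natAbs ∧ p.natAbs ∣ x.natAbs ∧ x.natAbs ≠ 0 from
        ⟨ha, Int.natAbs_dvd_natAbs.mpr hd, by omega⟩), hdiv]
      ring
    · have hm : PySem.Int.mod x p ≠ 0 := fun h => hd ((PySem.Int.mod_eq_zero_iff_dvd x p).mp h)
      simp only [vloopA, if_neg hm]
      rw [valI, dif_neg (by rintro ⟨-, hdd, -⟩; exact hd (Int.natAbs_dvd_natAbs.mp hdd))]
      simp

lemma vvq_eq_zero (a q j : Nat) (hj : 1 ≤ j) (hq : j < q) : vvq a q j = 0 := by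
  rw [vvq]
  have : ¬ (2 ≤ a ∧ 1 ≤ q ∧ q ∣ j ∧ 1 ≤ j) := by
    rintro ⟨-, -, hd, hj1⟩
    exact absurd (Nat.le_of_dvd hj1 hd) (by omega)
  simp [this]

lemma vvq_step (a q j : Nat) (ha : 2 ≤ a) (hq : 1 ≤ q) (hj : 1 ≤ j) :
    vvq a q j = (if q ∣ j then 1 else 0) + vvq a (q * a) j := by
  by_cases hd : q ∣ j
  · rw [vvq]; simp [ha, hq, hd, hj]
  · have h2 : ¬ q * a ∣ j := fun h => hd (dvd_trans (Dvd.intro a rfl) h)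
    rw [vvq, vvq]
    simp [hd, h2]

lemma vvq_scale (a : Nat) (ha : 2 ≤ a) :
    ∀ (d q j : Nat), j + 1 - q ≤ d → 1 ≤ q → 1 ≤ j → a ∣ j →
      vvq a (q * a) j = vvq a q (j / a) := by
  intro d
  induction d with
  | zero =>
    intro q j hdq hq hj hdvd
    have hjq : j < q := by omega
    have hja : 1 ≤ j / a := Nat.one_le_div_iff (by omega) |>.mpr (Nat.le_of_dvd (by omega) hdvd)
    have h1 : vvq a (q * a) j = 0 := vvq_eq_zero _ _ _ hj (by nlinarith)
    have h2 : vvq a q (j / a) = 0 := by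
      refine vvq_eq_zero _ _ _ hja ?_
      have := Nat.div_le_self j a
      omega
    rw [h1, h2]
  | succ d ih =>
    intro q j hdq hq hj hdvd
    have hiff : q * a ∣ j ↔ q ∣ j / a := by
      rw [Nat.dvd_div_iff_mul_dvd hdvd, mul_comm]
    have hja : 1 ≤ j / a := Nat.one_le_div_iff (by omega) |>.mpr (Nat.le_of_dvd (by omega) hdvd)
    by_cases hcase : q * a ∣ j
    · have hq2 : q ∣ j / a := hiff.mp hcase
      have hqa1 : 1 ≤ q * a := Nat.mul_pos (by omega) (by omega)
      rw [vvq, dif_pos (show 2 ≤ a ∧ 1 ≤ q * a ∧ q * a ∣ j ∧ 1 ≤ j from ⟨ha, hqa1, hcase, hj⟩)]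
      conv_rhs => rw [vvq]
      rw [dif_pos (show 2 ≤ a ∧ 1 ≤ q ∧ q ∣ j / a ∧ 1 ≤ j / a from ⟨ha, hq, hq2, hja⟩)]
      congr 1
      have hqj : q * a ≤ j := Nat.le_of_dvd (by omega) hcase
      have h2 : q * 2 ≤ q * a := Nat.mul_le_mul_left q ha
      exact ih (q * a) j (by omega) hqa1 hj hdvd
    · have hq2 : ¬ q ∣ j / a := fun h => hcase (hiff.mpr h)
      have l0 : vvq a (q * a) j = 0 := by rw [vvq]; simp [hcase]
      have r0 : vvq a q (j / a) = 0 := by rw [vvq]; simp [hq2]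
      rw [l0, r0]

lemma valI_eq_vvq (a : Nat) (ha : 2 ≤ a) : ∀ j, 1 ≤ j → valI a j = vvq a a j := by
  intro j
  induction j using Nat.strong_induction_on with
  | _ j ih =>
    intro hj
    by_cases hd : a ∣ j
    · rw [valI]
      simp only [dif_pos (show 2 ≤ a ∧ a ∣ j ∧ j ≠ 0 by exact ⟨ha, hd, by omega⟩)]
      rw [vvq]
      simp only [dif_pos (show 2 ≤ a ∧ 1 ≤ a ∧ a ∣ j ∧ 1 ≤ j by exact ⟨ha, by omega, hd, hj⟩)]
      have hja : 1 ≤ j / a := Nat.one_le_div_iff (by omega) |>.mpr (Nat.le_of_dvd (by omega) hd)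
      have hlt : j / a < j := Nat.div_lt_self (by omega) (by omega)
      rw [show a * a = a * a from rfl, vvq_scale a ha (j + 1 - a) a j (by omega) (by omega) hj hd,
        ih (j / a) hlt hja]
      ring
    · rw [valI, vvq]
      simp [hd]

lemma Fpre_eq_sum (a k : Nat) : Fpre a k = ∑ j ∈ Finset.range k, valI a (j + 1) := by
  induction k with
  | zero => simp [Fpre]
  | succ k ih => rw [Fpre, ih, Finset.sum_range_succ]

lemma twoW (j : Nat) (c : Int) :
    ∀ n : Nat, j ≤ n →
      2 * ∑ i ∈ Finset.range n, (if j ≤ i then c - (i : Int) else 0) =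
        ((n - j : Nat) : Int) * (2 * c - (n : Int) - (j : Int) + 1) := by
  intro n
  induction n with
  | zero => intro h; interval_cases j; simp
  | succ n ih =>
    intro hj
    rw [Finset.sum_range_succ]
    by_cases hjn : j ≤ n
    · rw [if_pos hjn, mul_add, ih hjn]
      have h1 : ((n + 1 - j : Nat) : Int) = (n : Int) + 1 - j := by omega
      have h2 : ((n - j : Nat) : Int) = (n : Int) - j := by omega
      rw [h1, h2]; push_cast; ring
    · rw [if_neg (by omega), add_zero]
      have hz : ∀ i ∈ Finset.range n, (if j ≤ i then c - (i : Int) else 0) = 0 := by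
        intro i hi
        rw [if_neg (by simp at hi; omega)]
      rw [Finset.sum_congr rfl hz, Finset.sum_const, smul_zero, mul_zero,
        show n + 1 - j = 0 by omega]
      simp

lemma swap_sum (n a : Nat) (ha : 2 ≤ a) :
    2 * ∑ i ∈ Finset.range n, ((n : Int) - (i : Int)) * Fpre a (i + 1) =
      ∑ j ∈ Finset.range n, tIw (n : Int) (j + 1) * valI a (j + 1) := by
  have hcongr : ∀ i ∈ Finset.range n, ((n : Int) - (i : Int)) * Fpre a (i + 1)
      = ∑ j ∈ Finset.range n, (if j ≤ i then ((n : Int) - (i : Int)) * valI a (j + 1) else 0) := by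
    intro i hi
    have hin : i < n := Finset.mem_range.mp hi
    rw [Fpre_eq_sum, Finset.mul_sum, ← Finset.sum_filter]
    refine Finset.sum_congr ?_ fun _ _ => rfl
    ext j
    simp only [Finset.mem_filter, Finset.mem_range]
    omega
  rw [Finset.sum_congr rfl hcongr, Finset.sum_comm, Finset.mul_sum]
  refine Finset.sum_congr rfl fun j hj => ?_
  have hjn : j < n := Finset.mem_range.mp hj
  have hpull : (∑ i ∈ Finset.range n, if j ≤ i then ((n : Int) - (i : Int)) * valI a (j + 1) else 0)
      = (∑ i ∈ Finset.range n, if j ≤ i then ((n : Int) - (i : Int)) else 0) * valI a (j + 1) := by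
    rw [Finset.sum_mul]
    refine Finset.sum_congr rfl fun i _ => ?_
    rw [ite_mul, zero_mul]
  rw [hpull, ← mul_assoc, twoW j (n : Int) n (by omega)]
  rw [tIw]
  push_cast [Nat.cast_sub (show j ≤ n by omega)]
  ring

lemma sum_multiples (q : Nat) (hq : 1 ≤ q) (f : Nat → Int) :
    ∀ n : Nat, (∑ i ∈ Finset.range n, if q ∣ (i + 1) then f (i + 1) else 0) =
      ∑ m ∈ Finset.range (n / q), f ((m + 1) * q) := by
  intro n
  induction n with
  | zero => simp
  | succ n ih =>
    rw [Finset.sum_range_succ, ih]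
    by_cases hd : q ∣ n + 1
    · rw [if_pos hd, Nat.succ_div_of_dvd hd, Finset.sum_range_succ]
      congr 2
      rw [← Nat.succ_div_of_dvd hd, Nat.div_mul_cancel hd]
    · rw [if_neg hd, Nat.succ_div_of_not_dvd hd, add_zero]

lemma two_s1 : ∀ M : Nat, 2 * ∑ m ∈ Finset.range M, ((m : Int) + 1) = (M : Int) * ((M : Int) + 1) := by
  intro M
  induction M with
  | zero => simp
  | succ M ih => rw [Finset.sum_range_succ, mul_add, ih]; push_cast; ring

lemma six_s2 : ∀ M : Nat, 6 * ∑ m ∈ Finset.range M, ((m : Int) + 1) ^ 2 =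
    (M : Int) * ((M : Int) + 1) * (2 * (M : Int) + 1) := by
  intro M
  induction M with
  | zero => simp
  | succ M ih => rw [Finset.sum_range_succ, mul_add, ih]; push_cast; ring

lemma floordiv_exact (k s x : Int) (hk : 0 < k) (h : x = k * s) : PySem.Int.floordiv x k = s := by
  subst h
  rw [PySem.Int.floordiv_eq_ediv_of_pos hk]
  exact Int.mul_ediv_cancel_left s (by omega)

lemma Gclosed (N : Int) (q : Nat) :
    ∀ M : Nat, (∑ m ∈ Finset.range M, tIw N ((m + 1) * q)) =
      (N + 1) * (N + 2) * (M : Int)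
        - (2 * N + 3) * (q : Int) * (∑ m ∈ Finset.range M, ((m : Int) + 1))
        + (q : Int) * (q : Int) * (∑ m ∈ Finset.range M, ((m : Int) + 1) ^ 2) := by
  intro M
  induction M with
  | zero => simp
  | succ M ih =>
    rw [Finset.sum_range_succ, ih, Finset.sum_range_succ, Finset.sum_range_succ]
    simp only [tIw]
    push_cast
    ring

lemma Ssum_zero (N : Int) (n a q : Nat) (hq : n < q) : Ssum N n a q = 0 := by
  refine Finset.sum_eq_zero fun i hi => ?_
  rw [vvq_eq_zero a q (i + 1) (by omega) (by simp at hi; omega), mul_zero]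

lemma Ssum_step (N : Int) (n a q : Nat) (ha : 2 ≤ a) (hq : 1 ≤ q) :
    Ssum N n a q = (∑ i ∈ Finset.range n, if q ∣ (i + 1) then tIw N (i + 1) else 0)
      + Ssum N n a (q * a) := by
  unfold Ssum
  rw [← Finset.sum_add_distrib]
  refine Finset.sum_congr rfl fun i hi => ?_
  rw [vvq_step a q (i + 1) ha hq (by omega), mul_add]
  congr 1
  split_ifs <;> ring

lemma bloop_eq (N : Int) (n a : Nat) (hn : N = (n : Int)) (ha : 2 ≤ a) :
    ∀ (f : Nat) (q : Nat) (e2 : Int), 1 ≤ q → n + 1 - q ≤ f →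
      bloopB N (a : Int) f (q : Int) e2 = e2 + Ssum N n a q := by
  intro f
  induction f with
  | zero =>
    intro q e2 hq hf
    rw [Ssum_zero N n a q (by omega)]
    simp [bloopB]
  | succ f ih =>
    intro q e2 hq hf
    by_cases hcase : q ≤ n
    · have hqN : (q : Int) ≤ N := by rw [hn]; exact_mod_cast hcase
      have hM : PySem.Int.floordiv N (q : Int) = ((n / q : Nat) : Int) := by
        rw [hn]; exact PySem.Int.floordiv_natCast n q
      simp only [bloopB, if_pos hqN, hM]
      rw [floordiv_exact 2 (∑ m ∈ Finset.range (n / q), ((m : Int) + 1)) _ (by norm_num)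
            (two_s1 (n / q)).symm,
          floordiv_exact 6 (∑ m ∈ Finset.range (n / q), ((m : Int) + 1) ^ 2) _ (by norm_num)
            (six_s2 (n / q)).symm]
      have hX : (N + 1) * (N + 2) * ((n / q : Nat) : Int)
          - (2 * N + 3) * (q : Int) * (∑ m ∈ Finset.range (n / q), ((m : Int) + 1))
          + (q : Int) * (q : Int) * (∑ m ∈ Finset.range (n / q), ((m : Int) + 1) ^ 2)
          = ∑ i ∈ Finset.range n, (if q ∣ (i + 1) then tIw N (i + 1) else 0) := by
        rw [← Gclosed N q (n / q), sum_multiples q hq (tIw N) n]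
      have h2 : q * 2 ≤ q * a := Nat.mul_le_mul_left q ha
      have hcast : ((q * a : Nat) : Int) = (q : Int) * (a : Int) := by push_cast; ring
      rw [← hcast, ih (q * a) _ (by omega) (by omega), Ssum_step N n a q ha hq, hX]
      ring
    · have hqN : ¬ (q : Int) ≤ N := by rw [hn]; exact_mod_cast hcase
      simp only [bloopB, if_neg hqN]
      rw [Ssum_zero N n a q (by omega)]
      ring

-- generic write-only fill loop: l[k] = g(k) for k in range(1, m+1)
lemma set_fold (n : Nat) (g : Int → Int) :
    ∀ (m : Nat) (l0 : List Int), l0.length = n + 1 → m ≤ n →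
      (((PySem.List.pyRange 1 ((m : Int) + 1) 1).foldl
          (fun l k => PySem.List.pySetD l k (g k)) l0).length = n + 1 ∧
       ∀ j : Nat, j ≤ n →
        PySem.List.pyGetD ((PySem.List.pyRange 1 ((m : Int) + 1) 1).foldl
            (fun l k => PySem.List.pySetD l k (g k)) l0) (j : Int) 0 =
          if 1 ≤ j ∧ j ≤ m then g (j : Int) else PySem.List.pyGetD l0 (j : Int) 0) := by
  intro m
  induction m with
  | zero =>
    intro l0 hlen hm
    rw [show (((0 : Nat) : Int) + 1) = 1 by norm_num,
      PySem.List.pyRange_one_eq_nil (by norm_num)]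
    refine ⟨hlen, fun j hj => ?_⟩
    rw [if_neg (by omega), List.foldl_nil]
  | succ m ih =>
    intro l0 hlen hm
    obtain ⟨ihlen, ihget⟩ := ih l0 hlen (by omega)
    have hsplit : PySem.List.pyRange 1 (((m + 1 : Nat) : Int) + 1) 1
        = PySem.List.pyRange 1 ((m : Int) + 1) 1 ++ [((m : Int) + 1)] := by
      rw [show ((m + 1 : Nat) : Int) + 1 = ((m : Int) + 1) + 1 by push_cast; ring]
      exact PySem.List.pyRange_one_succ_right (by omega)
    rw [hsplit, List.foldl_append, List.foldl_cons, List.foldl_nil]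
    refine ⟨by rw [PySem.List.length_pySetD]; exact ihlen, fun j hj => ?_⟩
    have key := PySem.List.pyGetD_pySetD_natCast
      ((PySem.List.pyRange 1 ((m : Int) + 1) 1).foldl (fun l k => PySem.List.pySetD l k (g k)) l0)
      (m + 1) j (g ((m : Int) + 1)) 0 (by rw [ihlen]; omega)
    rw [show ((m + 1 : Nat) : Int) = (m : Int) + 1 by push_cast; ring] at key
    rw [key]
    by_cases hcase : j = m + 1
    · subst hcase
      rw [if_pos rfl, if_pos (by omega)]
      congr 1
    · rw [if_neg hcase, ihget j hj]
      by_cases h1 : 1 ≤ j ∧ j ≤ m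
      · rw [if_pos h1, if_pos (by omega)]
      · rw [if_neg h1, if_neg (by omega)]

-- the prefix-sum fill loop: l[k] = l[k-1] + vp[k]
lemma fact_fold (n a : Nat) (vp : List Int)
    (hv : ∀ j : Nat, 1 ≤ j → j ≤ n → PySem.List.pyGetD vp (j : Int) 0 = valI a j) :
    ∀ (m : Nat) (l0 : List Int), l0.length = n + 1 →
      (∀ j : Nat, j ≤ n → PySem.List.pyGetD l0 (j : Int) 0 = 0) → m ≤ n →
      (((PySem.List.pyRange 1 ((m : Int) + 1) 1).foldl
          (fun l k => PySem.List.pySetD l k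
            (PySem.List.pyGetD l (k - 1) 0 + PySem.List.pyGetD vp k 0)) l0).length = n + 1 ∧
       ∀ j : Nat, j ≤ n →
        PySem.List.pyGetD ((PySem.List.pyRange 1 ((m : Int) + 1) 1).foldl
            (fun l k => PySem.List.pySetD l k
              (PySem.List.pyGetD l (k - 1) 0 + PySem.List.pyGetD vp k 0)) l0) (j : Int) 0 =
          if 1 ≤ j ∧ j ≤ m then Fpre a j else 0) := by
  intro m
  induction m with
  | zero =>
    intro l0 hlen hl0 hm
    rw [show (((0 : Nat) : Int) + 1) = 1 by norm_num,
      PySem.List.pyRange_one_eq_nil (by norm_num)]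
    refine ⟨hlen, fun j hj => ?_⟩
    rw [if_neg (by omega), List.foldl_nil]
    exact hl0 j hj
  | succ m ih =>
    intro l0 hlen hl0 hm
    obtain ⟨ihlen, ihget⟩ := ih l0 hlen hl0 (by omega)
    have hsplit : PySem.List.pyRange 1 (((m + 1 : Nat) : Int) + 1) 1
        = PySem.List.pyRange 1 ((m : Int) + 1) 1 ++ [((m : Int) + 1)] := by
      rw [show ((m + 1 : Nat) : Int) + 1 = ((m : Int) + 1) + 1 by push_cast; ring]
      exact PySem.List.pyRange_one_succ_right (by omega)
    rw [hsplit, List.foldl_append, List.foldl_cons, List.foldl_nil]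
    refine ⟨by rw [PySem.List.length_pySetD]; exact ihlen, fun j hj => ?_⟩
    have key := PySem.List.pyGetD_pySetD_natCast
      ((PySem.List.pyRange 1 ((m : Int) + 1) 1).foldl
        (fun l k => PySem.List.pySetD l k
          (PySem.List.pyGetD l (k - 1) 0 + PySem.List.pyGetD vp k 0)) l0)
      (m + 1) j
      (PySem.List.pyGetD ((PySem.List.pyRange 1 ((m : Int) + 1) 1).foldl
        (fun l k => PySem.List.pySetD l k
          (PySem.List.pyGetD l (k - 1) 0 + PySem.List.pyGetD vp k 0)) l0) ((m : Int) + 1 - 1) 0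
        + PySem.List.pyGetD vp ((m : Int) + 1) 0)
      0 (by rw [ihlen]; omega)
    rw [show ((m + 1 : Nat) : Int) = (m : Int) + 1 by push_cast; ring] at key
    rw [key]
    have hval : PySem.List.pyGetD ((PySem.List.pyRange 1 ((m : Int) + 1) 1).foldl
        (fun l k => PySem.List.pySetD l k
          (PySem.List.pyGetD l (k - 1) 0 + PySem.List.pyGetD vp k 0)) l0) ((m : Int) + 1 - 1) 0
        + PySem.List.pyGetD vp ((m : Int) + 1) 0 = Fpre a (m + 1) := by
      rw [show ((m : Int) + 1 - 1) = ((m : Nat) : Int) by ring, ihget m (by omega),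
        show ((m : Int) + 1) = ((m + 1 : Nat) : Int) by push_cast; ring,
        hv (m + 1) (by omega) (by omega)]
      cases m with
      | zero => simp [Fpre]
      | succ m' => rw [if_pos ⟨by omega, le_refl _⟩]; rfl
    rw [hval]
    by_cases hcase : j = m + 1
    · subst hcase
      rw [if_pos rfl, if_pos (by omega)]
    · rw [if_neg hcase, ihget j hj]
      by_cases h1 : 1 ≤ j ∧ j ≤ m
      · rw [if_pos h1, if_pos (by omega)]
      · rw [if_neg h1, if_neg (by omega)]

lemma E_fold (N : Int) (n a : Nat) (hn : N = (n : Int)) (fact : List Int)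
    (hf : ∀ j : Nat, 1 ≤ j → j ≤ n → PySem.List.pyGetD fact (j : Int) 0 = Fpre a j) :
    ∀ m : Nat, m ≤ n →
      (PySem.List.pyRange 1 ((m : Int) + 1) 1).foldl
          (fun E k => E + (N + 1 - k) * PySem.List.pyGetD fact k 0) 0 =
        ∑ i ∈ Finset.range m, (N - (i : Int)) * Fpre a (i + 1) := by
  intro m
  induction m with
  | zero =>
    rw [show (((0 : Nat) : Int) + 1) = 1 by norm_num,
      PySem.List.pyRange_one_eq_nil (by norm_num)]
    simp
  | succ m ih =>
    intro hm
    have hsplit : PySem.List.pyRange 1 (((m + 1 : Nat) : Int) + 1) 1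
        = PySem.List.pyRange 1 ((m : Int) + 1) 1 ++ [((m : Int) + 1)] := by
      rw [show ((m + 1 : Nat) : Int) + 1 = ((m : Int) + 1) + 1 by push_cast; ring]
      exact PySem.List.pyRange_one_succ_right (by omega)
    rw [hsplit, List.foldl_append, List.foldl_cons, List.foldl_nil, ih (by omega),
      Finset.sum_range_succ,
      show ((m : Int) + 1) = ((m + 1 : Nat) : Int) by push_cast; ring,
      hf (m + 1) (by omega) (by omega)]
    congr 1
    push_cast
    ring

-- per-prime agreement of the two loop bodies
lemma prime_step (N p : Int) (h : N ≤ 0 ∨ 2 ≤ |p|) :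
    (let vp0 := PySem.List.pyRepeat [(0 : Int)] (N + 1)
     let vp_in_k := (PySem.List.pyRange 1 (N + 1) 1).foldl (fun l k =>
         PySem.List.pySetD l k (vloopA p k.natAbs k 0).2) vp0
     let f0 := PySem.List.pyRepeat [(0 : Int)] (N + 1)
     let fact_vp := (PySem.List.pyRange 1 (N + 1) 1).foldl (fun l k =>
         PySem.List.pySetD l k (PySem.List.pyGetD l (k - 1) 0 + PySem.List.pyGetD vp_in_k k 0)) f0
     (PySem.List.pyRange 1 (N + 1) 1).foldl (fun E k =>
         E + (N + 1 - k) * PySem.List.pyGetD fact_vp k 0) 0) =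
    PySem.Int.floordiv (if 2 ≤ |p| then bloopB N |p| (N.toNat + 1) |p| 0 else 0) 2 := by
  dsimp only
  by_cases hN : N ≤ 0
  · have hnil : PySem.List.pyRange 1 (N + 1) 1 = [] := PySem.List.pyRange_one_eq_nil (by omega)
    simp only [hnil, List.foldl_nil]
    have hz : PySem.Int.floordiv 0 2 = 0 := by
      rw [PySem.Int.floordiv_eq_ediv_of_pos (by norm_num)]; rfl
    by_cases hp2 : 2 ≤ |p|
    · rw [if_pos hp2, Int.toNat_of_nonpos hN]
      simp only [bloopB]
      rw [if_neg (by omega : ¬ |p| ≤ N), hz]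
    · rw [if_neg hp2, hz]
  · have hp2 : 2 ≤ |p| := h.resolve_left hN
    have hap2 : 2 ≤ p.natAbs := by
      have : (2 : Int) ≤ (p.natAbs : Int) := by rwa [← Int.abs_eq_natAbs]
      exact_mod_cast this
    have hn : N = (N.toNat : Int) := (Int.toNat_of_nonneg (by omega)).symm
    rw [if_pos hp2, Int.abs_eq_natAbs]
    rw [hn, PySem.List.pyRepeat_singleton,
      show (((N.toNat : Int) + 1)).toNat = N.toNat + 1 by omega]
    set n := N.toNat with hndef
    -- the vp_in_k list
    obtain ⟨hvlen, hvget⟩ := set_fold n (fun k => (vloopA p k.natAbs k 0).2) n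
      (List.replicate (n + 1) (0 : Int)) (by simp) (le_refl n)
    have hvp : ∀ jj : Nat, 1 ≤ jj → jj ≤ n →
        PySem.List.pyGetD ((PySem.List.pyRange 1 ((n : Int) + 1) 1).foldl
          (fun l k => PySem.List.pySetD l k (vloopA p k.natAbs k 0).2)
          (List.replicate (n + 1) (0 : Int))) (jj : Int) 0 = valI p.natAbs jj := by
      intro jj h1 h2
      rw [hvget jj h2, if_pos ⟨h1, h2⟩]
      have hv := vloop_snd p hap2 ((jj : Int)).natAbs (jj : Int) 0
        (by exact_mod_cast (by omega : jj ≠ 0)) (le_refl _)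
      rw [hv, Int.natAbs_natCast, zero_add]
    have hrep0 : ∀ jj : Nat, jj ≤ n →
        PySem.List.pyGetD (List.replicate (n + 1) (0 : Int)) (jj : Int) 0 = 0 := by
      intro jj _
      rw [PySem.List.pyGetD_natCast]
      simp [List.getD]
    obtain ⟨hflen, hfget⟩ := fact_fold n p.natAbs
      ((PySem.List.pyRange 1 ((n : Int) + 1) 1).foldl
        (fun l k => PySem.List.pySetD l k (vloopA p k.natAbs k 0).2)
        (List.replicate (n + 1) (0 : Int))) hvp n
      (List.replicate (n + 1) (0 : Int)) (by simp) hrep0 (le_refl n)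
    have hf : ∀ jj : Nat, 1 ≤ jj → jj ≤ n →
        PySem.List.pyGetD ((PySem.List.pyRange 1 ((n : Int) + 1) 1).foldl
          (fun l k => PySem.List.pySetD l k
            (PySem.List.pyGetD l (k - 1) 0 +
              PySem.List.pyGetD ((PySem.List.pyRange 1 ((n : Int) + 1) 1).foldl
                (fun l k => PySem.List.pySetD l k (vloopA p k.natAbs k 0).2)
                (List.replicate (n + 1) (0 : Int))) k 0))
          (List.replicate (n + 1) (0 : Int))) (jj : Int) 0 = Fpre p.natAbs jj := by
      intro jj h1 h2
      rw [hfget jj h2, if_pos ⟨h1, h2⟩]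
    rw [E_fold ((n : Int)) n p.natAbs rfl _ hf n (le_refl n)]
    -- right side
    have hRB := bloop_eq ((n : Int)) n p.natAbs rfl hap2 (n + 1) p.natAbs 0
      (by omega) (by omega)
    rw [Int.toNat_natCast, hRB, zero_add]
    have hSs : Ssum ((n : Int)) n p.natAbs p.natAbs
        = 2 * ∑ i ∈ Finset.range n, ((n : Int) - (i : Int)) * Fpre p.natAbs (i + 1) := by
      unfold Ssum
      rw [show (∑ i ∈ Finset.range n, tIw (n : Int) (i + 1) * vvq p.natAbs p.natAbs (i + 1))
          = ∑ i ∈ Finset.range n, tIw (n : Int) (i + 1) * valI p.natAbs (i + 1) from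
        Finset.sum_congr rfl fun i _ => by
          rw [valI_eq_vvq p.natAbs hap2 (i + 1) (by omega)]]
      exact (swap_sum n p.natAbs hap2).symm
    rw [hSs, floordiv_exact 2 _ _ (by norm_num) rfl]

-- ===== VERDICT (by name: the statement is the Claim_ definition above) =====
theorem exponents_for_star_spec : Claim_equal_exponents_for_star := by
  intro N primes _ hpre
  unfold Spec_exponents_for_star exponents_for_star exponents_for_star_alt
  rw [PySem.List.foldl_append_singleton_eq_map, PySem.List.foldl_append_singleton_eq_map]
  simp only [List.nil_append]
  refine List.map_congr_left fun p hp => ?_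
  exact prime_step N p (hpre.imp id fun hall => hall p hp)
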